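-- pv_equiv track=rewrite | github.com/YadaYuki/atcoder- | abc234/e2.py | get_arithmetics
-- ===== SOURCE A (Python) =====
-- def get_arithmetics(from_n:int,step:int,max_digit:int)->list:
--     """
--     The arithmetic sequence:
--     """
--     result = []
--     arithmetic_arr = []
--     tail_n = from_n
--     while len(arithmetic_arr)+1 <= max_digit and (0 <= tail_n and tail_n <= 9):
--         arithmetic_arr.append(tail_n)
--         result.append(int("".join(map(str,arithmetic_arr))))
--         tail_n += step
--     return result
-- ===== SOURCE B (Python) =====
-- def get_arithmetics(from_n: int, step: int, max_digit: int) -> list: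
--     # Two passes: first collect the digit sequence, then build each output
--     # by extending a running prefix string instead of re-joining the whole
--     # digit list at every step.
--     digits = []
--     tail_n = from_n
--     while len(digits) < max_digit and 0 <= tail_n <= 9:
--         digits.append(tail_n)
--         tail_n += step
--     result = []
--     prefix = ""
--     for d in digits:
--         prefix += str(d)
--         result.append(int(prefix))
--     return result
-- ===== Notes on version B (the rewrite author's own statement) =====
-- stated objective: alternative
-- what changed: A interleaves digit generation with re-joining and re-parsing the whole digit list on every iteration; B separates the work into two passes - generate the digit list, then build each output by extending one running prefix string - so no per-step join over the full list is performed.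
import Mathlib
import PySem

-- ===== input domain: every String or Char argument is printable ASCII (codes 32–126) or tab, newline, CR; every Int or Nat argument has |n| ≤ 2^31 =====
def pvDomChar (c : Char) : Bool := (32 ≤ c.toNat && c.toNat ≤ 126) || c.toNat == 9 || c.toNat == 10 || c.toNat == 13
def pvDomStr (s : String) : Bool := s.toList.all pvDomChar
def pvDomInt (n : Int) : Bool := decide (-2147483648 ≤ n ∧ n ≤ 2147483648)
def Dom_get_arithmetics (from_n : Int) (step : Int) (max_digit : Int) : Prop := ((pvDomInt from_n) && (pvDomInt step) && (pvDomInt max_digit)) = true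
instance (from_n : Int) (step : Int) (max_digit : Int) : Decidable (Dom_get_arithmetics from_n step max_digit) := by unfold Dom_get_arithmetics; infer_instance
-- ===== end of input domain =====

-- ===== PORT A =====
-- B changes only the decomposition (two passes, incremental prefix string); return values agree everywhere.
-- A's int(...) never raises (the joined string is a nonempty digit string), so the .getD 0 default is never used.
def getArithGoA (stp : Int) (maxd : Int) (result : List Int) (arr : List Int) (tail : Int) : List Int :=
  if h : (arr.length : Int) + 1 ≤ maxd ∧ 0 ≤ tail ∧ tail ≤ 9 then
    getArithGoA stp maxd
      (result ++ [(PySem.Int.ofStr? (PySem.Str.join "" ((arr ++ [tail]).map PySem.Int.toStr))).getD 0])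
      (arr ++ [tail]) (tail + stp)
  else result
termination_by (maxd - arr.length).toNat
decreasing_by simp only [List.length_append, List.length_cons, List.length_nil]; omega

def get_arithmetics (from_n : Int) (step : Int) (max_digit : Int) : List Int :=
  getArithGoA step max_digit [] [] from_n

-- ===== PORT B =====
-- pass 1: the while loop collecting the digit sequence
def getArithDigits (stp : Int) (maxd : Int) (ds : List Int) (tail : Int) : List Int :=
  if h : (ds.length : Int) < maxd ∧ 0 ≤ tail ∧ tail ≤ 9 then
    getArithDigits stp maxd (ds ++ [tail]) (tail + stp)
  else ds
termination_by (maxd - ds.length).toNat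
decreasing_by simp only [List.length_append, List.length_cons, List.length_nil]; omega

-- pass 2 loop body: prefix += str(d); result.append(int(prefix))
def getArithStep (st : String × List Int) (d : Int) : String × List Int :=
  (st.1 ++ PySem.Int.toStr d,
   st.2 ++ [(PySem.Int.ofStr? (st.1 ++ PySem.Int.toStr d)).getD 0])

def get_arithmetics_alt (from_n : Int) (step : Int) (max_digit : Int) : List Int :=
  ((getArithDigits step max_digit [] from_n).foldl getArithStep ("", [])).2

-- ===== PRECONDITION & SPEC =====
-- A is total (the while loop always terminates: the digit list grows every iteration), so no Pre_.
def Spec_get_arithmetics (from_n : Int) (step : Int) (max_digit : Int) (out : List Int) : Prop := out = get_arithmetics_alt from_n step max_digit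
instance (from_n : Int) (step : Int) (max_digit : Int) (out : List Int) : Decidable (Spec_get_arithmetics from_n step max_digit out) := by unfold Spec_get_arithmetics; infer_instance

-- ===== CLAIM (what is proved, stated in full; the proofs are below) =====
def Claim_equal_get_arithmetics : Prop := ∀ (from_n : Int) (step : Int) (max_digit : Int), Dom_get_arithmetics from_n step max_digit → Spec_get_arithmetics from_n step max_digit (get_arithmetics from_n step max_digit)

-- ===== LEMMAS AND PROOFS =====

-- joining with the empty separator distributes over appending one more part
lemma join_nil_append (l : List (List Char)) (c : List Char) :
    PySem.Chars.join [] (l ++ [c]) = PySem.Chars.join [] l ++ c := by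
  induction l with
  | nil => simp [PySem.Chars.join_singleton, PySem.Chars.join_nil]
  | cons a l ih =>
    cases l with
    | nil => simp [PySem.Chars.join_cons_cons, PySem.Chars.join_singleton]
    | cons b l' =>
      rw [List.cons_append, List.cons_append, PySem.Chars.join_cons_cons,
        PySem.Chars.join_cons_cons, ← List.cons_append, ih]
      simp [List.append_assoc]

-- loop exits of the two while loops, as rewrite rules
lemma getArithGoA_stop (stp maxd : Int) (result arr : List Int) (tail : Int)
    (h : ¬ ((arr.length : Int) + 1 ≤ maxd ∧ 0 ≤ tail ∧ tail ≤ 9)) :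
    getArithGoA stp maxd result arr tail = result := by
  rw [getArithGoA, dif_neg h]

lemma getArithDigits_stop (stp maxd : Int) (ds : List Int) (tail : Int)
    (h : ¬ ((ds.length : Int) < maxd ∧ 0 ≤ tail ∧ tail ≤ 9)) :
    getArithDigits stp maxd ds tail = ds := by
  rw [getArithDigits, dif_neg h]

-- B's digit loop only appends: the accumulator can be pulled out front
lemma getArithDigits_acc (n : Nat) (stp maxd : Int) (ds : List Int) (tail : Int)
    (hn : (maxd - ds.length).toNat ≤ n) :
    getArithDigits stp maxd ds tail = ds ++ getArithDigits stp (maxd - ds.length) [] tail := by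
  induction n generalizing maxd ds tail with
  | zero =>
    rw [getArithDigits_stop _ _ _ _ (by intro h; omega),
        getArithDigits_stop _ _ _ _ (by simp; intro h; omega)]
    simp
  | succ n ih =>
    by_cases hc : (ds.length : Int) < maxd ∧ 0 ≤ tail ∧ tail ≤ 9
    · have hc2 : ((([] : List Int)).length : Int) < maxd - ds.length ∧ 0 ≤ tail ∧ tail ≤ 9 := by
        exact ⟨by simp; omega, hc.2⟩
      conv_lhs => rw [getArithDigits]
      rw [dif_pos hc, ih maxd (ds ++ [tail]) (tail + stp) (by simp; omega)]
      conv_rhs => rw [getArithDigits]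
      rw [dif_pos hc2]
      simp only [List.nil_append]
      rw [ih (maxd - ds.length) [tail] (tail + stp) (by simp; omega)]
      have heq : maxd - ((ds ++ [tail]).length : Int)
          = maxd - (ds.length : Int) - (([tail] : List Int).length : Int) := by simp; omega
      rw [heq]
      simp [List.append_assoc]
    · have hc2 : ¬ (((([] : List Int)).length : Int) < maxd - ds.length ∧ 0 ≤ tail ∧ tail ≤ 9) := by
        simp only [List.length_nil, Int.natCast_zero]
        intro h; exact hc ⟨by omega, h.2⟩
      rw [getArithDigits_stop _ _ _ _ hc, getArithDigits_stop _ _ _ _ hc2]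
      simp

-- one unfolding of B's digit loop in cons form
lemma getArithDigits_cons (stp maxd tail : Int)
    (hc : 0 < maxd ∧ 0 ≤ tail ∧ tail ≤ 9) :
    getArithDigits stp maxd [] tail = tail :: getArithDigits stp (maxd - 1) [] (tail + stp) := by
  have hc' : ((([] : List Int)).length : Int) < maxd ∧ 0 ≤ tail ∧ tail ≤ 9 := by
    exact ⟨by simp; omega, hc.2⟩
  conv_lhs => rw [getArithDigits]
  rw [dif_pos hc']
  simp only [List.nil_append]
  rw [getArithDigits_acc ((maxd - 1).toNat) stp maxd [tail] (tail + stp) (by simp)]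
  simp

-- the running prefix string of B always spells the digit list A maintains
lemma prefix_invariant (p : String) (arr : List Int) (tail : Int)
    (hp : p.toList = PySem.Chars.join [] (arr.map PySem.Int.toChars)) :
    (p ++ PySem.Int.toStr tail).toList
      = PySem.Chars.join [] ((arr ++ [tail]).map PySem.Int.toChars) := by
  simp only [List.map_append, List.map_cons, List.map_nil, join_nil_append,
    String.toList_append, hp, PySem.Int.toList_toStr]

-- both int(...) calls parse the same character list
lemma parse_eq (p : String) (arr : List Int) (tail : Int)
    (hp : p.toList = PySem.Chars.join [] (arr.map PySem.Int.toChars)) :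
    PySem.Int.ofStr? (PySem.Str.join "" ((arr ++ [tail]).map PySem.Int.toStr))
      = PySem.Int.ofStr? (p ++ PySem.Int.toStr tail) := by
  simp only [PySem.Int.ofStr?]
  congr 1
  rw [prefix_invariant p arr tail hp, PySem.Str.toList_join]
  simp [List.map_map, List.map_append, Function.comp_def, PySem.Int.toList_toStr]

-- main synchronisation: A's interleaved loop equals B's fold over the remaining digits
lemma main_sync (n : Nat) (stp maxd : Int) (result arr : List Int) (tail : Int) (p : String)
    (hn : (maxd - arr.length).toNat ≤ n)
    (hp : p.toList = PySem.Chars.join [] (arr.map PySem.Int.toChars)) :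
    getArithGoA stp maxd result arr tail
      = ((getArithDigits stp (maxd - arr.length) [] tail).foldl getArithStep (p, result)).2 := by
  induction n generalizing maxd result arr tail p with
  | zero =>
    rw [getArithGoA_stop _ _ _ _ _ (by intro h; omega),
        getArithDigits_stop _ _ _ _ (by simp; intro h; omega)]
    simp
  | succ n ih =>
    by_cases hc : (arr.length : Int) + 1 ≤ maxd ∧ 0 ≤ tail ∧ tail ≤ 9
    · conv_lhs => rw [getArithGoA]
      rw [dif_pos hc,
        ih maxd _ (arr ++ [tail]) (tail + stp) (p ++ PySem.Int.toStr tail)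
          (by simp; omega) (prefix_invariant p arr tail hp)]
      have harr : maxd - ((arr ++ [tail]).length : Int) = maxd - (arr.length : Int) - 1 := by
        simp; omega
      rw [harr,
        getArithDigits_cons stp (maxd - arr.length) tail ⟨by omega, hc.2⟩, List.foldl_cons]
      have hstep : getArithStep (p, result) tail
          = (p ++ PySem.Int.toStr tail,
             result ++ [(PySem.Int.ofStr? (PySem.Str.join ""
               ((arr ++ [tail]).map PySem.Int.toStr))).getD 0]) := by
        simp only [getArithStep, parse_eq p arr tail hp]
      rw [hstep]
    · rw [getArithGoA_stop _ _ _ _ _ hc,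
        getArithDigits_stop _ _ _ _ (by simp; intro h; omega)]
      simp

-- ===== VERDICT (by name: the statement is the Claim_ definition above) =====
theorem get_arithmetics_spec : Claim_equal_get_arithmetics := by
  intro from_n step max_digit _
  unfold Spec_get_arithmetics get_arithmetics get_arithmetics_alt
  have h := main_sync (max_digit.toNat) step max_digit [] [] from_n ""
    (by simp) (by simp [PySem.Chars.join_nil])
  simpa using h
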